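-- pv_equiv track=rewrite | github.com/InTheAbusiveRelationshipWithUnity/LinearLab | normal-level.py | polinoms
-- ===== SOURCE A (Python) =====
-- def polinoms(N) -> dict:
--     answer1 = []
--     answer2 = []
--
--     for a in range(4):
--         f = a ** 9
--         for i in range(9):
--             f += ((i + N) % 4) * a ** i
--
--         if f % 4 == 0:
--             answer1.append(a)
--
--     for b in range(7):
--         f = 0
--         for i in range(7):
--             f += ((i + N) % 7) * b ** i
--
--         if f % 7 == 0:
--             answer2.append(b)
--
--     return {
--         "polinom 1": answer1,
--         "polinom 2": answer2
--     }
-- ===== SOURCE B (Python) =====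
-- def polinoms(N) -> dict:
--     def horner(coeffs, x):
--         acc = 0
--         for c in reversed(coeffs):
--             acc = acc * x + c
--         return acc
--
--     coeffs1 = [(i + N) % 4 for i in range(9)] + [1]
--     coeffs2 = [(i + N) % 7 for i in range(7)]
--     return {
--         "polinom 1": [a for a in range(4) if horner(coeffs1, a) % 4 == 0],
--         "polinom 2": [b for b in range(7) if horner(coeffs2, b) % 7 == 0],
--     }
-- ===== Notes on version B (the rewrite author's own statement) =====
-- stated objective: idiomatic
-- what changed: B builds each polynomial's coefficient list once and evaluates it with a single Horner fold per base (list comprehensions with a shared horner helper), instead of A's nested loops summing independent ((i+N)%m)*base**i power terms into an accumulator.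
import Mathlib
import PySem

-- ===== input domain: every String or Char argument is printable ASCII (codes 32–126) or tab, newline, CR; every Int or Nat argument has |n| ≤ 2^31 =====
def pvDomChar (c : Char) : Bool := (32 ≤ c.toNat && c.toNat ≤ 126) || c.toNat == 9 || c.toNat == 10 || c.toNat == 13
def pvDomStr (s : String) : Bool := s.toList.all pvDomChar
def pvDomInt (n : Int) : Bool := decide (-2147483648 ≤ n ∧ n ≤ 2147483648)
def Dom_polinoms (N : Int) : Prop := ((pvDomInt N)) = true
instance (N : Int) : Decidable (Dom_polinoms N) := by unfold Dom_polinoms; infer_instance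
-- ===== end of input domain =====

-- B: one coefficient list per polynomial + a Horner fold per base, instead of A's nested power-sum loops (idiomatic; same cost).


-- ===== PORT A =====
-- a ** i with i drawn from range(...) is a nonnegative-exponent int power: ported as a ^ i.toNat (exact there).
def polinoms (N : Int) : List (String × List Int) :=
  let answer1 : List Int :=
    (PySem.List.pyRange 0 4 1).foldl (fun ans a =>
      let f : Int := a ^ (9 : Nat)
      let f := (PySem.List.pyRange 0 9 1).foldl
        (fun f i => f + PySem.Int.mod (i + N) 4 * a ^ i.toNat) f
      if PySem.Int.mod f 4 = 0 then ans ++ [a] else ans) []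
  let answer2 : List Int :=
    (PySem.List.pyRange 0 7 1).foldl (fun ans b =>
      let f : Int := 0
      let f := (PySem.List.pyRange 0 7 1).foldl
        (fun f i => f + PySem.Int.mod (i + N) 7 * b ^ i.toNat) f
      if PySem.Int.mod f 7 = 0 then ans ++ [b] else ans) []
  [("polinom 1", answer1), ("polinom 2", answer2)]

-- ===== PORT B =====
-- helper: Horner evaluation, folding over the reversed coefficient list (Source B's `horner`)
def pvHorner (coeffs : List Int) (x : Int) : Int :=
  coeffs.reverse.foldl (fun acc c => acc * x + c) 0

def polinoms_alt (N : Int) : List (String × List Int) :=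
  let coeffs1 := (PySem.List.pyRange 0 9 1).map (fun i => PySem.Int.mod (i + N) 4) ++ [1]
  let coeffs2 := (PySem.List.pyRange 0 7 1).map (fun i => PySem.Int.mod (i + N) 7)
  [("polinom 1", (PySem.List.pyRange 0 4 1).filter (fun a => PySem.Int.mod (pvHorner coeffs1 a) 4 == 0)),
   ("polinom 2", (PySem.List.pyRange 0 7 1).filter (fun b => PySem.Int.mod (pvHorner coeffs2 b) 7 == 0))]

-- ===== PRECONDITION & SPEC =====
def Spec_polinoms (N : Int) (out : List (String × List Int)) : Prop := out = polinoms_alt N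
instance (N : Int) (out : List (String × List Int)) : Decidable (Spec_polinoms N out) := by unfold Spec_polinoms; infer_instance

-- ===== CLAIM (what is proved, stated in full; the proofs are below) =====
def Claim_equal_polinoms : Prop := ∀ (N : Int), Dom_polinoms N → Spec_polinoms N (polinoms N)

-- ===== LEMMAS AND PROOFS =====
-- decide-vs-beq bridge for the membership tests
lemma pv_decide_beq (x m : Int) : decide (PySem.Int.mod x m = 0) = (PySem.Int.mod x m == 0) := by
  cases h : PySem.Int.mod x m == 0 <;> simp_all

-- A's power-sum accumulator for polynomial 1 equals B's Horner value of coeffs1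
lemma pv_inner1 (N a : Int) :
    (PySem.List.pyRange 0 9 1).foldl
      (fun f i => f + PySem.Int.mod (i + N) 4 * a ^ i.toNat) (a ^ (9 : Nat))
    = pvHorner ((PySem.List.pyRange 0 9 1).map (fun i => PySem.Int.mod (i + N) 4) ++ [1]) a := by
  have h : PySem.List.pyRange 0 9 1 = [0, 1, 2, 3, 4, 5, 6, 7, 8] := by decide
  rw [h]
  simp only [pvHorner, List.map, List.cons_append, List.nil_append, List.reverse, List.reverseAux, List.foldl, show ((0 : Int).toNat) = 0 from rfl, show ((1 : Int).toNat) = 1 from rfl, show ((2 : Int).toNat) = 2 from rfl, show ((3 : Int).toNat) = 3 from rfl, show ((4 : Int).toNat) = 4 from rfl, show ((5 : Int).toNat) = 5 from rfl, show ((6 : Int).toNat) = 6 from rfl, show ((7 : Int).toNat) = 7 from rfl, show ((8 : Int).toNat) = 8 from rfl]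
  ring

-- A's power-sum accumulator for polynomial 2 equals B's Horner value of coeffs2
lemma pv_inner2 (N b : Int) :
    (PySem.List.pyRange 0 7 1).foldl
      (fun f i => f + PySem.Int.mod (i + N) 7 * b ^ i.toNat) 0
    = pvHorner ((PySem.List.pyRange 0 7 1).map (fun i => PySem.Int.mod (i + N) 7)) b := by
  have h : PySem.List.pyRange 0 7 1 = [0, 1, 2, 3, 4, 5, 6] := by decide
  rw [h]
  simp only [pvHorner, List.map, List.reverse, List.reverseAux, List.foldl, show ((0 : Int).toNat) = 0 from rfl, show ((1 : Int).toNat) = 1 from rfl, show ((2 : Int).toNat) = 2 from rfl, show ((3 : Int).toNat) = 3 from rfl, show ((4 : Int).toNat) = 4 from rfl, show ((5 : Int).toNat) = 5 from rfl, show ((6 : Int).toNat) = 6 from rfl]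
  ring

-- ===== VERDICT (by name: the statement is the Claim_ definition above) =====
theorem polinoms_spec : Claim_equal_polinoms := by
  intro N _
  unfold Spec_polinoms polinoms polinoms_alt
  rw [PySem.List.foldl_append_ite_eq_filter, PySem.List.foldl_append_ite_eq_filter]
  simp only [List.nil_append]
  refine congrArg₂ _ (congrArg _ ?_) (congrArg (fun l => [(("polinom 2" : String), l)]) ?_)
  · exact List.filter_congr (fun a _ => by rw [pv_inner1 N a]; exact pv_decide_beq _ 4)
  · exact List.filter_congr (fun b _ => by rw [pv_inner2 N b]; exact pv_decide_beq _ 7)
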